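-- pv_equiv track=rewrite | github.com/marlonsale08/ReconocimientoFacialGlobalHitss-Peru | Proyecto_Global_Hitss_RF_v2/Funciones/Funcion_buscador_dni_nombre.py | extractor_nombre
-- ===== SOURCE A (Python) =====
-- def extractor_nombre(cadena=None):
--    nombre=""
--    i=0
--    for caracter in cadena:
--       if caracter==" ":
--          i=i+1
--       if i==2:
--          nombre=nombre+caracter
--    return nombre
-- ===== SOURCE B (Python) =====
-- def extractor_nombre(cadena=None):
--     parts = cadena.split(" ")
--     return " " + parts[2] if len(parts) > 2 else ""
-- ===== Notes on version B (the rewrite author's own statement) =====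
-- stated objective: simpler
-- what changed: Replaces the character-by-character counting loop with a single space-split plus one index: the result is a space followed by the third part when there are at least three parts, else the empty string.
import Mathlib
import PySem

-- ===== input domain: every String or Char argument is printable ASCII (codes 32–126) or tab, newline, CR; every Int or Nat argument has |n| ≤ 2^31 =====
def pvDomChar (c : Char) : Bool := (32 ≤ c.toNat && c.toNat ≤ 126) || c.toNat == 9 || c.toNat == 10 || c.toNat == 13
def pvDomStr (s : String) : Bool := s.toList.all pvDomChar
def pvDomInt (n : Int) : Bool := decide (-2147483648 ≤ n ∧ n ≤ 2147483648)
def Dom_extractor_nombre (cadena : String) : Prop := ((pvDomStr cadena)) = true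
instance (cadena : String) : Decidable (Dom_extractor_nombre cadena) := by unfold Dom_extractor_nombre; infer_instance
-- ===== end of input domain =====

-- B replaces A's character-counting accumulation loop with one split on " " plus an index
-- (objective: simpler). Both ports are total on String, so there is no Pre_.

-- ===== PORT A =====
-- A's loop, step for step: state (nombre, i); nombre is kept as its list of characters
-- (Lean's own String.append is kernel-opaque) and rebuilt with String.ofList at the end — exact.
def extractor_nombre (cadena : String) : String :=
  let r := cadena.toList.foldl
    (fun (st : List Char × Int) caracter =>
      let i := if caracter = ' ' then st.2 + 1 else st.2
      let nombre := if i = 2 then st.1 ++ [caracter] else st.1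
      (nombre, i))
    ([], 0)
  String.ofList r.1

-- ===== PORT B =====
-- cadena.split(" ") with a nonempty separator is PySem.Chars.splitOn; 'len(parts) > 2 … parts[2]'
-- is the match on the first three parts.
def extractor_nombre_alt (cadena : String) : String :=
  let parts := PySem.Chars.splitOn cadena.toList [' ']
  match parts with
  | _ :: _ :: p :: _ => String.ofList (' ' :: p)
  | _ => ""

-- ===== PRECONDITION & SPEC =====
def Spec_extractor_nombre (cadena : String) (out : String) : Prop := out = extractor_nombre_alt cadena
instance (cadena : String) (out : String) : Decidable (Spec_extractor_nombre cadena out) := by unfold Spec_extractor_nombre; infer_instance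

-- ===== CLAIM (what is proved, stated in full; the proofs are below) =====
def Claim_equal_extractor_nombre : Prop := ∀ (cadena : String), Dom_extractor_nombre cadena → Spec_extractor_nombre cadena (extractor_nombre cadena)

-- ===== LEMMAS AND PROOFS =====

-- Reference splitter: the parts of l separated by single spaces.
def pvSplitSp : List Char → List (List Char)
  | [] => [[]]
  | c :: r =>
    if c = ' ' then [] :: pvSplitSp r
    else
      match pvSplitSp r with
      | [] => [[c]]
      | h :: t => (c :: h) :: t

theorem pvSplitSp_head (l : List Char) :
    ∃ t, pvSplitSp l = (l.takeWhile (fun c => c ≠ ' ')) :: t := by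
  induction l with
  | nil => exact ⟨[], rfl⟩
  | cons c r ih =>
    by_cases hc : c = ' '
    · subst hc
      refine ⟨pvSplitSp r, ?_⟩
      simp [pvSplitSp, List.takeWhile]
    · obtain ⟨t, ht⟩ := ih
      refine ⟨t, ?_⟩
      simp [pvSplitSp, hc, ht, List.takeWhile]

-- PySem's split loop computes pvSplitSp (single-char separator " ").
theorem pvGo_eq (fuel : Nat) (l cur : List Char) (acc : List (List Char))
    (hf : l.length ≤ fuel) :
    PySem.Chars.splitOn.go [' '] fuel l cur acc =
      acc.reverse ++
        (match pvSplitSp l with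
         | [] => []
         | h :: t => (cur.reverse ++ h) :: t) := by
  induction fuel generalizing l cur acc with
  | zero =>
    have : l = [] := List.length_eq_zero_iff.mp (Nat.le_zero.mp hf)
    subst this
    simp [PySem.Chars.splitOn.go, pvSplitSp]
  | succ n ih =>
    cases l with
    | nil => simp [PySem.Chars.splitOn.go, pvSplitSp]
    | cons c rest =>
      by_cases hc : c = ' '
      · subst hc
        have hpre : [' '].isPrefixOf (' ' :: rest) = true := by simp [List.isPrefixOf]
        rw [PySem.Chars.splitOn.go]
        simp only [hpre, if_true, List.length_cons, List.drop_succ_cons, List.length_nil, List.drop_zero]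
        rw [ih rest [] (cur.reverse :: acc) (by simpa using Nat.le_of_succ_le_succ hf)]
        obtain ⟨t, ht⟩ := pvSplitSp_head rest
        simp [pvSplitSp, ht]
      · have hpre : [' '].isPrefixOf (c :: rest) = false := by
          simp [List.isPrefixOf]
          intro h; exact hc h.symm
        rw [PySem.Chars.splitOn.go]
        simp only [hpre, Bool.false_eq_true, if_false]
        rw [ih rest (c :: cur) acc (by simpa using Nat.le_of_succ_le_succ hf)]
        obtain ⟨t, ht⟩ := pvSplitSp_head rest
        simp [pvSplitSp, hc, ht]

theorem pvSplitOn_eq (l : List Char) :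
    PySem.Chars.splitOn l [' '] = pvSplitSp l := by
  rw [PySem.Chars.splitOn, pvGo_eq (l.length + 1) l [] [] (Nat.le_succ _)]
  obtain ⟨t, ht⟩ := pvSplitSp_head l
  simp [ht]

-- A's loop as a recursion on the remaining characters, given the current space count i.
def pvG : List Char → Int → List Char
  | [], _ => []
  | c :: r, i =>
    let i' := if c = ' ' then i + 1 else i
    (if i' = 2 then [c] else []) ++ pvG r i'

theorem pvFoldl_eq_pvG (l : List Char) (acc : List Char) (i : Int) :
    (l.foldl
      (fun (st : List Char × Int) caracter =>
        (if (if caracter = ' ' then st.2 + 1 else st.2) = 2 then st.1 ++ [caracter] else st.1,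
         if caracter = ' ' then st.2 + 1 else st.2))
      (acc, i)).1 = acc ++ pvG l i := by
  induction l generalizing acc i with
  | nil => simp [pvG]
  | cons c r ih =>
    simp only [List.foldl_cons, pvG]
    by_cases h2 : (if c = ' ' then i + 1 else i) = 2 <;> simp [h2, ih]

theorem pvG_three (l : List Char) (i : Int) (hi : 3 ≤ i) : pvG l i = [] := by
  induction l generalizing i with
  | nil => rfl
  | cons c r ih =>
    simp only [pvG]
    by_cases hc : c = ' '
    · rw [if_pos hc, if_neg (show ¬(i + 1 = (2:Int)) by omega)]
      simpa using ih (i + 1) (by omega)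
    · rw [if_neg hc, if_neg (show ¬(i = (2:Int)) by omega)]
      simpa using ih i hi

theorem pvG_two (l : List Char) : pvG l 2 = l.takeWhile (fun c => c ≠ ' ') := by
  induction l with
  | nil => rfl
  | cons c r ih =>
    by_cases hc : c = ' '
    · simp [pvG, hc, List.takeWhile, pvG_three r 3 (le_refl _)]
    · simp [pvG, hc, List.takeWhile, ih]

theorem pvG_one (l : List Char) :
    pvG l 1 =
      (match pvSplitSp l with
       | _ :: p :: _ => ' ' :: p
       | _ => []) := by
  induction l with
  | nil => rfl
  | cons c r ih =>
    by_cases hc : c = ' '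
    · subst hc
      have h2 : pvSplitSp (' ' :: r) = [] :: pvSplitSp r := by simp [pvSplitSp]
      obtain ⟨t, ht⟩ := pvSplitSp_head r
      simp only [pvG, show ((1:Int) + 1 = 2) by decide, if_true, h2, ht]
      rw [pvG_two]
      cases t <;> simp
    · have h2 : pvSplitSp (c :: r) =
          (match pvSplitSp r with | [] => [[c]] | h :: t => (c :: h) :: t) := by
        simp [pvSplitSp, hc]
      obtain ⟨t, ht⟩ := pvSplitSp_head r
      simp only [pvG, if_neg hc, show ¬((1:Int) = 2) by decide, if_false, List.nil_append, ih,
        h2, ht]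
      cases t <;> simp

theorem pvG_zero (l : List Char) :
    pvG l 0 =
      (match pvSplitSp l with
       | _ :: _ :: p :: _ => ' ' :: p
       | _ => []) := by
  induction l with
  | nil => rfl
  | cons c r ih =>
    by_cases hc : c = ' '
    · subst hc
      have h2 : pvSplitSp (' ' :: r) = [] :: pvSplitSp r := by simp [pvSplitSp]
      obtain ⟨t, ht⟩ := pvSplitSp_head r
      rw [show pvG (' ' :: r) 0 = pvG r 1 by simp [pvG], pvG_one, h2, ht]
      cases t <;> simp
    · have h2 : pvSplitSp (c :: r) =
          (match pvSplitSp r with | [] => [[c]] | h :: t => (c :: h) :: t) := by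
        simp [pvSplitSp, hc]
      obtain ⟨t, ht⟩ := pvSplitSp_head r
      rw [show pvG (c :: r) 0 = pvG r 0 by simp [pvG, hc], ih, h2, ht]
      cases t with
      | nil => simp
      | cons b t2 => cases t2 <;> simp

-- ===== VERDICT (by name: the statement is the Claim_ definition above) =====
theorem extractor_nombre_spec : Claim_equal_extractor_nombre := by
  intro cadena _
  show extractor_nombre cadena = extractor_nombre_alt cadena
  simp only [extractor_nombre, extractor_nombre_alt]
  rw [pvFoldl_eq_pvG, pvSplitOn_eq, List.nil_append, pvG_zero]
  cases h : pvSplitSp cadena.toList with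
  | nil => rfl
  | cons a t1 =>
    cases t1 with
    | nil => rfl
    | cons b t2 =>
      cases t2 <;> rfl
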